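-- pv_equiv track=rewrite | github.com/jayantsingh123/Data_structures | modified_string.py | modified
-- ===== SOURCE A (Python) =====
-- def modified(s):
--     """ A string needs to modify, as per the following rules to make it valid:
--
--        The string should not have three consecutive same characters (Refer example for explanation).
--        He can add any number of characters anywhere in the string.
--        Find the minimum number of characters which Ishaan must insert in the string to make it valid.
--        """
--     ctr=0
--     prev=''
--     idx=[]
--     for i in range(len(s)):
--         curr=s[i]
--         if curr==prev:
--             ctr+=1
--             if ctr==2:
--                 idx.append(i)
--                 ctr=0
--         else:
--             ctr=0
--         prev=curr
--     return len(idx)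
-- ===== SOURCE B (Python) =====
-- def modified(s):
--     """Sum, over each maximal run of identical characters of length L, (L-1)//2."""
--     total = 0
--     i = 0
--     n = len(s)
--     while i < n:
--         j = i + 1
--         while j < n and s[j] == s[i]:
--             j += 1
--         total += (j - i - 1) // 2
--         i = j
--     return total
-- ===== Notes on version B (the rewrite author's own statement) =====
-- stated objective: alternative
-- what changed: Replaced the running-counter-with-reset scan (counter increments on repeats, emits and resets at 2) by a run-decomposition: split the string into maximal runs of identical characters and sum the closed form (L-1)//2 per run of length L.
import Mathlib
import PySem

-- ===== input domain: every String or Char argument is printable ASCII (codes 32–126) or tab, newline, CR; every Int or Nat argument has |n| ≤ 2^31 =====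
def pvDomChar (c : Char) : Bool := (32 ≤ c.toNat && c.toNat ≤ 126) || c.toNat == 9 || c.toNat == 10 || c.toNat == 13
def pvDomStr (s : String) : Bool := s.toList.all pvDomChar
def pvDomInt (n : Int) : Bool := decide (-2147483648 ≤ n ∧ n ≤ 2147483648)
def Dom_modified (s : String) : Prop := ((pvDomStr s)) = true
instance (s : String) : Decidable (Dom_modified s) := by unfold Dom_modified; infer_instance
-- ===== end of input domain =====

-- B replaces A's running counter (reset on emit) by maximal-run decomposition with the closed form (L-1)//2 per run; same O(n) cost, plainer structure.

-- ===== PORT A =====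
-- one loop step: state (ctr, prev, idx); Python's prev starts '' (never equal to a char), modelled as Option Char
def modStep (st : Int × Option Char × List Int) (p : Int × Char) : Int × Option Char × List Int :=
  let curr := p.2
  if some curr = st.2.1 then
    let ctr := st.1 + 1
    if ctr = 2 then (0, some curr, st.2.2 ++ [p.1]) else (ctr, some curr, st.2.2)
  else (0, some curr, st.2.2)

def modified (s : String) : Int :=
  let r := (PySem.List.enumerate s.toList).foldl modStep (0, none, [])
  (r.2.2.length : Int)

-- ===== PORT B =====
-- scan one maximal run (inner while), add (runlen-1)//2, continue after the run (outer while)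
def runCount : List Char → Int
  | [] => 0
  | c :: rest =>
      (((rest.takeWhile (fun d => d = c)).length / 2 : Nat) : Int)
        + runCount (rest.dropWhile (fun d => d = c))
termination_by l => l.length
decreasing_by
  exact Nat.lt_succ_of_le (List.length_dropWhile_le _ _)

def modified_alt (s : String) : Int := runCount s.toList

-- ===== PRECONDITION & SPEC =====
def Spec_modified (s : String) (out : Int) : Prop := out = modified_alt s
instance (s : String) (out : Int) : Decidable (Spec_modified s out) := by unfold Spec_modified; infer_instance

-- ===== CLAIM (what is proved, stated in full; the proofs are below) =====
def Claim_equal_modified : Prop := ∀ (s : String), Dom_modified s → Spec_modified s (modified s)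

-- ===== LEMMAS AND PROOFS =====

-- functional restatement of A's loop body (idx length only)
def countA (ctr : Int) (prev : Option Char) : List Char → Nat
  | [] => 0
  | c :: t =>
      if some c = prev then
        (if ctr + 1 = 2 then 1 + countA 0 (some c) t else countA (ctr + 1) (some c) t)
      else countA 0 (some c) t

-- A's fold produces idx of length (idx₀.length + countA ctr prev chars)
theorem foldA_length (l : List (Int × Char)) : ∀ (ctr : Int) (prev : Option Char) (idx : List Int),
    ((l.foldl modStep (ctr, prev, idx)).2.2).length = idx.length + countA ctr prev (l.map Prod.snd) := by
  induction l with
  | nil => intro ctr prev idx; simp [countA]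
  | cons p t ih =>
      intro ctr prev idx
      simp only [List.foldl_cons, List.map_cons, countA, modStep]
      split_ifs with h h2
      · rw [ih]; simp; omega
      · rw [ih]
      · rw [ih]

-- main combinatorial lemma: within a run, A's counter with reset-at-2 yields (matched + ctr)/2
theorem countA_run (l : List Char) : ∀ (c : Char) (ctr : Int), (ctr = 0 ∨ ctr = 1) →
    (countA ctr (some c) l : Int)
      = (((l.takeWhile (fun d => d = c)).length + ctr.toNat) / 2 : Nat)
        + runCount (l.dropWhile (fun d => d = c)) := by
  induction l with
  | nil => intro c ctr h; simp [countA, runCount]; rcases h with h | h <;> simp [h]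
  | cons d t ih =>
      intro c ctr h
      by_cases hdc : d = c
      · subst hdc
        simp only [countA, List.takeWhile_cons, List.dropWhile_cons, decide_true, if_true, List.length_cons]
        rcases h with h | h <;> subst h
        · rw [if_neg (by norm_num : ¬ (0:Int) + 1 = 2),
            (by norm_num : (0:Int) + 1 = 1), ih d 1 (Or.inr rfl)]
          omega
        · rw [if_pos (by norm_num : (1:Int) + 1 = 2), Nat.cast_add, ih d 0 (Or.inl rfl)]
          omega
      · have hne : ¬ (some d = some c) := by simpa using hdc
        simp only [countA, if_neg hne, List.takeWhile_cons, List.dropWhile_cons,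
          decide_eq_true_eq, if_neg hdc, List.length_nil]
        rw [ih d 0 (Or.inl rfl), runCount]
        omega

theorem countA_eq_runCount (l : List Char) : (countA 0 none l : Int) = runCount l := by
  cases l with
  | nil => simp [countA, runCount]
  | cons c t =>
      simp only [countA, if_neg (by simp : ¬ (some c = (none : Option Char))), runCount]
      exact countA_run t c 0 (Or.inl rfl)

-- ===== VERDICT (by name: the statement is the Claim_ definition above) =====
theorem modified_spec : Claim_equal_modified := by
  intro s _
  show modified s = modified_alt s
  have hA : modified s
      = ((((PySem.List.enumerate s.toList).foldl modStep (0, none, [])).2.2).length : Int) := rfl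
  rw [hA, foldA_length, PySem.List.map_snd_enumerate]
  simp only [List.length_nil, Nat.zero_add]
  exact countA_eq_runCount s.toList
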